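-- pv_equiv track=rewrite | github.com/datstat-consulting/FreqDomainDiffForecast | DensityOneFormalProof/semantics_mr_witness.py | sieve_lambda
-- ===== SOURCE A (Python) =====
-- from typing import List, Dict
--
-- def sieve_lambda(N: int) -> List[int]:
--     spf = [0]*(N+1)
--     for i in range(2, N+1):
--         if spf[i]==0:
--             spf[i]=i
--             if i*i <= N:
--                 for j in range(i*i, N+1, i):
--                     if spf[j]==0: spf[j]=i
--     lam = [0]*(N+1); lam[1]=1
--     for x in range(2, N+1):
--         p=spf[x]; y=x//p; k=1
--         while y%p==0:
--             y//=p; k+=1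
--         lam[x] = lam[y] * ((-1)**k)
--     return lam
-- ===== SOURCE B (Python) =====
-- from typing import List, Dict
--
-- def sieve_lambda(N: int) -> List[int]:
--     # flip signs in place over prime powers: lambda(x) = product of -1 over all
--     # prime powers q dividing x, so each prime power q <= N negates lam[j] for q | j
--     lam = [1] * (N + 1)
--     lam[0] = 0
--     comp = [False] * (N + 1)
--     for p in range(2, N + 1):
--         if not comp[p]:
--             for j in range(p * p, N + 1, p):
--                 comp[j] = True
--             q = p
--             while q <= N:
--                 for j in range(q, N + 1, q):
--                     lam[j] = -lam[j]
--                 q *= p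
--     return lam
-- ===== Notes on version B (the rewrite author's own statement) =====
-- stated objective: alternative
-- what changed: B drops A's smallest-prime-factor array and the DP over lam entirely: it sieves composites with a boolean array and builds lambda in place by negating entries over every prime power q up to the bound (one sign flip per prime-power divisor, because lambda is the parity of the prime-factor count), with no division and no second pass.
import Mathlib
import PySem

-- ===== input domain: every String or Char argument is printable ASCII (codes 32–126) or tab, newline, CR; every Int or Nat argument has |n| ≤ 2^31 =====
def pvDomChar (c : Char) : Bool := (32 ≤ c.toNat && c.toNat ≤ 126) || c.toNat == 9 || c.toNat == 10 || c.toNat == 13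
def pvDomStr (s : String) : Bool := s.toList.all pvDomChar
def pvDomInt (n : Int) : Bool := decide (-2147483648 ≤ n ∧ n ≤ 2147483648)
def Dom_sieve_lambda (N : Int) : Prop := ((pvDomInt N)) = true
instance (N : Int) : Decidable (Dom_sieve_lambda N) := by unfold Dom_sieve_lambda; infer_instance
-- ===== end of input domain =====

-- B drops A's smallest-prime-factor array and DP entirely: it sieves composites with a boolean
-- array and builds lambda in place by flipping signs over every prime power (one -1 per prime
-- power divisor), with no division and no second pass (alternative algorithm).

-- thin wrappers over PySem primitives: every index the admitted inputs (Pre_: 1 ≤ N)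
-- reach is in range 0..N, where pyGetD/pySetD agree exactly with Python's l[i] / l[i]=v.
def pvGet (l : List Int) (i : Int) : Int := PySem.List.pyGetD l i 0
def pvSet (l : List Int) (i v : Int) : List Int := PySem.List.pySetD l i v

-- ===== PORT A =====
-- while y%p==0: y//=p; k+=1   (fuel-bounded; fuel x.toNat suffices since p ≥ 2 halves y each turn)
def stripA (p : Int) : Nat → Int → Int → Int × Int
  | 0, y, k => (y, k)
  | fuel+1, y, k =>
    if PySem.Int.mod y p = 0 then stripA p fuel (PySem.Int.floordiv y p) (k+1) else (y, k)

def innerA (N i : Int) (spf : List Int) : List Int :=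
  (PySem.List.pyRange (i*i) (N+1) i).foldl
    (fun s j => if pvGet s j = 0 then pvSet s j i else s) spf

def spfA (N : Int) : List Int :=
  (PySem.List.pyRange 2 (N+1) 1).foldl
    (fun s i =>
      if pvGet s i = 0 then
        let s := pvSet s i i
        if i*i ≤ N then innerA N i s else s
      else s)
    (List.replicate (N+1).toNat 0)

-- lam[x] = lam[y] * (-1)**k   (k ≥ 1 always, so the Int exponent is its toNat)
def lamStepA (spf lam : List Int) (x : Int) : List Int :=
  let p := pvGet spf x
  let yk := stripA p x.toNat (PySem.Int.floordiv x p) 1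
  pvSet lam x (pvGet lam yk.1 * (-1)^(yk.2.toNat))

def sieve_lambda (N : Int) : List Int :=
  (PySem.List.pyRange 2 (N+1) 1).foldl (lamStepA (spfA N))
    (pvSet (List.replicate (N+1).toNat 0) 1 1)

-- ===== PORT B =====
def pvGetB (l : List Bool) (i : Int) : Bool := PySem.List.pyGetD l i false

-- for j in range(p*p, N+1, p): comp[j] = True
def compMark (N p : Int) (c : List Bool) : List Bool :=
  (PySem.List.pyRange (p*p) (N+1) p).foldl (fun s j => PySem.List.pySetD s j true) c

-- inner flip pass: for j in range(q, N+1, q): lam[j] = -lam[j]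
def flipMult (N q : Int) (lam : List Int) : List Int :=
  (PySem.List.pyRange q (N+1) q).foldl (fun s j => pvSet s j (-(pvGet s j))) lam

-- while q <= N: <flip pass>; q *= p   (fuel-bounded; fuel N.toNat+1 suffices since q ≥ 2 at least doubles)
def powersB (N p : Int) : Nat → Int → List Int → List Int
  | 0, _, lam => lam
  | fuel+1, q, lam => if q ≤ N then powersB N p fuel (q*p) (flipMult N q lam) else lam

-- loop body: if not comp[p]: mark composites from p*p; flip over all powers of p
def stageB (N : Int) (st : List Int × List Bool) (p : Int) : List Int × List Bool :=
  if pvGetB st.2 p = false then (powersB N p (N.toNat+1) p st.1, compMark N p st.2) else st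

def sieve_lambda_alt (N : Int) : List Int :=
  ((PySem.List.pyRange 2 (N+1) 1).foldl (stageB N)
    (pvSet (List.replicate (N+1).toNat 1) 0 0, List.replicate (N+1).toNat false)).1

-- ===== PRECONDITION & SPEC =====
-- Python A raises IndexError whenever the bound is not positive (its initial write into lam
-- falls outside the list); it returns normally on every admitted input.
def Pre_sieve_lambda (N : Int) : Prop := 1 ≤ N
instance (N : Int) : Decidable (Pre_sieve_lambda N) := by unfold Pre_sieve_lambda; infer_instance
def pvWitness_sieve_lambda : Int := (6)

def Spec_sieve_lambda (N : Int) (out : List Int) : Prop := out = sieve_lambda_alt N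
instance (N : Int) (out : List Int) : Decidable (Spec_sieve_lambda N out) := by unfold Spec_sieve_lambda; infer_instance

-- ===== CLAIM (what is proved, stated in full; the proofs are below) =====
def Claim_equal_sieve_lambda : Prop := ∀ (N : Int), Dom_sieve_lambda N → Pre_sieve_lambda N → Spec_sieve_lambda N (sieve_lambda N)

-- ===== LEMMAS AND PROOFS =====

-- reference value: lam[m] = (-1)^Ω(m) for m ≥ 1, and 0 at index 0
def ref (m : Nat) : Int := if m = 0 then 0 else (-1)^(m.primeFactorsList.length)

theorem ref_step (p m : Nat) (hp : p.Prime) (hd : p ∣ m) (hm : m ≠ 0) :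
    ref m = -ref (m / p) := by
  have hq : m / p ≠ 0 := by
    have := Nat.div_pos (Nat.le_of_dvd (Nat.pos_of_ne_zero hm) hd) hp.pos
    omega
  have hm' : m = p * (m / p) := (Nat.mul_div_cancel' hd).symm
  have hlen : m.primeFactorsList.length = (m / p).primeFactorsList.length + 1 := by
    conv_lhs => rw [hm']
    rw [(Nat.perm_primeFactorsList_mul hp.ne_zero hq).length_eq]
    simp [Nat.primeFactorsList_prime hp]
  simp only [ref, if_neg hm, if_neg hq, hlen, pow_succ]
  ring

theorem ref_pow (p : Nat) : ∀ (j m : Nat), p.Prime → p^j ∣ m → m ≠ 0 →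
    ref m = (-1)^j * ref (m / p^j) := by
  intro j
  induction j with
  | zero => intro m _ _ _; simp
  | succ j ih =>
    intro m hp hd hm
    obtain ⟨c, hc⟩ := hd
    have hp0 : 0 < p := hp.pos
    have hdp : p ∣ m := ⟨p^j * c, by rw [hc, pow_succ]; ring⟩
    have hdiv : m / p = p^j * c := by
      rw [hc, pow_succ]
      rw [show p^j * p * c = p * (p^j * c) by ring, Nat.mul_div_cancel_left _ hp0]
    have hq : m / p ≠ 0 := by
      have := Nat.div_pos (Nat.le_of_dvd (Nat.pos_of_ne_zero hm) hdp) hp0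
      omega
    have h1 := ref_step p m hp hdp hm
    have h2 := ih (m / p) hp ⟨c, hdiv⟩ hq
    have h3 : m / p / p^j = m / p^(j+1) := by
      rw [hdiv, Nat.mul_div_cancel_left _ (Nat.pow_pos hp0), hc,
        Nat.mul_div_cancel_left _ (Nat.pow_pos hp0)]
    rw [h1, h2, h3, pow_succ]
    ring

-- get/set facts
theorem pvGet_pvSet (l : List Int) (a b v : Int) (ha : 0 ≤ a) (_ha2 : a < l.length)
    (hb : 0 ≤ b) (hb2 : b < l.length) :
    pvGet (pvSet l a v) b = if b = a then v else pvGet l b := by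
  unfold pvGet pvSet
  rw [PySem.List.pySetD_of_nonneg l v ha]
  rw [PySem.List.pyGetD_eq_getElem _ _ hb (by simpa using hb2)]
  rw [PySem.List.pyGetD_eq_getElem _ _ hb hb2]
  rw [List.getElem_set]
  have : a.toNat = b.toNat ↔ b = a := by omega
  split_ifs with h1 h2 h2 <;> first | rfl | (exfalso; omega)

theorem pvGet_replicate (n : Nat) (b : Int) : pvGet (List.replicate n (0:Int)) b = 0 := by
  unfold pvGet
  by_cases h : PySem.Raise.InRange (List.replicate n (0:Int)).length b
  · exact List.eq_of_mem_replicate (PySem.List.pyGetD_mem _ 0 h)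
  · exact PySem.List.pyGetD_of_none _ _ _ ((PySem.List.pyGet?_eq_none_iff _ _).mpr (by simpa using h))

theorem length_pvSet (l : List Int) (i v : Int) : (pvSet l i v).length = l.length := by
  simp [pvSet]

-- A's inner write loop: each slot j is set to i the first time it is seen while 0
theorem foldl_write (i : Int) (hi : i ≠ 0) : ∀ (js : List Int) (s : List Int),
    (∀ j ∈ js, 0 ≤ j ∧ j < (s.length : Int)) →
    ((js.foldl (fun s j => if pvGet s j = 0 then pvSet s j i else s) s).length = s.length ∧
     ∀ b : Int, 0 ≤ b → b < (s.length : Int) →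
       pvGet (js.foldl (fun s j => if pvGet s j = 0 then pvSet s j i else s) s) b =
         if b ∈ js ∧ pvGet s b = 0 then i else pvGet s b) := by
  intro js
  induction js with
  | nil => intro s _; simp
  | cons j js ih =>
    intro s hjs
    obtain ⟨hj0, hj1⟩ := hjs j (by simp)
    set s1 : List Int := if pvGet s j = 0 then pvSet s j i else s with hs1
    have hlen1 : s1.length = s.length := by
      rw [hs1]; split_ifs <;> simp [length_pvSet]
    have hget1 : ∀ b : Int, 0 ≤ b → b < (s.length : Int) →
        pvGet s1 b = if b = j ∧ pvGet s b = 0 then i else pvGet s b := by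
      intro b hb0 hb1
      rw [hs1]
      by_cases h1 : pvGet s j = 0
      · rw [if_pos h1, pvGet_pvSet s j b i hj0 (by omega) hb0 (by omega)]
        by_cases hbj : b = j
        · subst hbj; simp [h1]
        · simp [hbj]
      · rw [if_neg h1, if_neg]
        rintro ⟨hbj, hbz⟩; exact h1 (hbj ▸ hbz)
    have ihres := ih s1 (by rw [hlen1]; intro x hx; exact hjs x (by simp [hx]))
    constructor
    · simpa [hlen1] using ihres.1
    · intro b hb0 hb1
      have := ihres.2 b hb0 (by rw [hlen1]; exact hb1)
      simp only [List.foldl_cons, ← hs1]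
      rw [this, hget1 b hb0 hb1]
      by_cases hbj : b = j
      · subst hbj
        by_cases hbz : pvGet s b = 0 <;> simp [hbz, hi]
      · by_cases hbz : pvGet s b = 0 <;> by_cases hbm : b ∈ js <;> simp [hbj, hbz, hbm]

-- partial sieve, for induction over A's outer loop
def spfAUpTo (N t : Int) : List Int :=
  (PySem.List.pyRange 2 t 1).foldl
    (fun s i =>
      if pvGet s i = 0 then
        let s := pvSet s i i
        if i*i ≤ N then innerA N i s else s
      else s)
    (List.replicate (N+1).toNat 0)

theorem foldl_range2_succ {α : Type} (f : α → Int → α) (init : α) (t : Int) (ht : 2 ≤ t) :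
    (PySem.List.pyRange 2 (t+1) 1).foldl f init = f ((PySem.List.pyRange 2 t 1).foldl f init) t := by
  rw [PySem.List.pyRange_one_succ_right ht, List.foldl_append]; rfl

-- a composite m with smallest prime factor t satisfies t*t ≤ m
theorem sq_minFac_le (m t : Nat) (h2 : 2 ≤ m) (ht : m.minFac = t) (hne : t ≠ m) : t*t ≤ m := by
  obtain ⟨k, hk⟩ := Nat.minFac_dvd m
  rw [ht] at hk
  have hk1 : k ≠ 1 := by rintro rfl; omega
  have hk0 : k ≠ 0 := by rintro rfl; omega
  have h1 : m.minFac ≤ k.minFac := Nat.minFac_le_of_dvd (Nat.minFac_prime hk1).two_le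
    (dvd_trans (Nat.minFac_dvd k) ⟨t, by rw [hk]; ring⟩)
  have h2' : k.minFac ≤ k := Nat.minFac_le (by omega)
  calc t*t ≤ t*k := Nat.mul_le_mul_left t (by omega)
  _ = m := hk.symm

def condA (m t : Nat) : Bool := if m.minFac = m then decide (m < t) else decide (m.minFac < t)

theorem spfA_inv (N : Int) (hN : 1 ≤ N) : ∀ t : Nat, 2 ≤ t → t ≤ N.toNat+1 →
    ((spfAUpTo N (t:Int)).length = N.toNat+1 ∧
     ∀ m : Nat, m ≤ N.toNat →
       pvGet (spfAUpTo N (t:Int)) (m:Int) =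
         if 2 ≤ m ∧ condA m t then (m.minFac : Int) else 0) := by
  intro t h2
  induction t, h2 using Nat.le_induction with
  | base =>
    intro _
    unfold spfAUpTo
    rw [show ((2:Nat):Int) = 2 by norm_num, PySem.List.pyRange_one_eq_nil (le_refl 2)]
    simp only [List.foldl_nil]
    refine ⟨by simp; omega, ?_⟩
    intro m hm
    rw [if_neg, show pvGet (List.replicate (N+1).toNat 0) (m:Int) = 0 by simp [pvGet]]
    rintro ⟨h2m, hcb⟩
    have := (Nat.minFac_prime (by omega : m ≠ 1)).two_le
    simp only [condA] at hcb
    split at hcb <;> simp only [decide_eq_true_eq] at hcb <;> omega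
  | succ t h2 ih =>
    intro hle
    have hle' : t ≤ N.toNat := by omega
    obtain ⟨hlen, hget⟩ := ih (by omega)
    have hstep : spfAUpTo N ((t+1:Nat):Int) =
        (fun s i =>
          if pvGet s i = 0 then
            let s := pvSet s i i
            if i*i ≤ N then innerA N i s else s
          else s) (spfAUpTo N (t:Int)) (t:Int) := by
      unfold spfAUpTo
      rw [show ((t+1:Nat):Int) = (t:Int)+1 by push_cast; ring]
      rw [foldl_range2_succ _ _ _ (by exact_mod_cast h2)]
    set s := spfAUpTo N (t:Int) with hs
    have htm : pvGet s (t:Int) = if 2 ≤ t ∧ condA t t then (t.minFac : Int) else 0 := hget t hle'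
    by_cases hpr : t.minFac = t
    · -- t is prime: write spf[t]=t, then fill empty multiples of t from t*t on (if any fit)
      have hprime : Nat.Prime t := Nat.prime_def_minFac.mpr ⟨h2, hpr⟩
      have hz : pvGet s (t:Int) = 0 := by
        rw [htm, if_neg]
        rintro ⟨_, hcb⟩
        simp only [condA] at hcb
        rw [if_pos hpr] at hcb
        simp only [decide_eq_true_eq] at hcb
        omega
      rw [hstep]
      simp only [hz, if_pos]
      set s1 := pvSet s (t:Int) (t:Int) with hs1
      have hlen1 : s1.length = N.toNat+1 := by rw [hs1, length_pvSet, hlen]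
      have hget1 : ∀ m : Nat, m ≤ N.toNat →
          pvGet s1 (m:Int) = if m = t then (t:Int) else pvGet s (m:Int) := by
        intro m hm
        rw [hs1, pvGet_pvSet s _ _ _ (by positivity) (by rw [hlen]; push_cast; omega)
          (by positivity) (by rw [hlen]; push_cast; omega)]
        by_cases he : m = t
        · subst he; simp
        · rw [if_neg (by exact_mod_cast he), if_neg he]
      have hmain : ∀ m : Nat, m ≤ N.toNat → m ≠ t →
          (¬(2 ≤ m ∧ condA m t) → (2 ≤ m ∧ condA m (t+1)) → (t*t ≤ m ∧ t ∣ m ∧ m.minFac = t)) ∧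
          ((2 ≤ m ∧ condA m t) → (2 ≤ m ∧ condA m (t+1))) := by
        intro m hm hne
        constructor
        · rintro hc ⟨hm2, hcb⟩
          simp only [condA] at hcb
          have hnc : ¬ condA m t := fun h => hc ⟨hm2, h⟩
          simp only [condA] at hnc
          split at hcb <;> simp only [decide_eq_true_eq] at hcb
          · rename_i hpm
            rw [if_pos hpm] at hnc
            simp only [decide_eq_true_eq] at hnc
            exact absurd (by omega : m = t) hne
          · rename_i hpm
            rw [if_neg hpm] at hnc
            simp only [decide_eq_true_eq] at hnc
            have hmf : m.minFac = t := by omega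
            exact ⟨sq_minFac_le m t hm2 hmf (by rw [← hmf]; exact fun h => hpm h),
              hmf ▸ Nat.minFac_dvd m, hmf⟩
        · rintro ⟨hm2, hcb⟩
          refine ⟨hm2, ?_⟩
          simp only [condA] at hcb ⊢
          split <;> split at hcb <;> simp_all only [decide_eq_true_eq] <;> omega
      by_cases hguard : (t:Int)*(t:Int) ≤ N
      · rw [if_pos hguard]
        have hbounds : ∀ j ∈ PySem.List.pyRange ((t:Int)*(t:Int)) (N+1) (t:Int),
            0 ≤ j ∧ j < (s1.length : Int) := by
          intro j hj
          rw [PySem.List.mem_pyRange_iff_of_pos (by omega)] at hj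
          have : (s1.length : Int) = (N.toNat : Int) + 1 := by rw [hlen1]; push_cast; ring
          have ht0 : (0:Int) ≤ (t:Int)*(t:Int) := by positivity
          omega
        obtain ⟨hwlen, hwget⟩ := foldl_write (t:Int) (by omega)
          (PySem.List.pyRange ((t:Int)*(t:Int)) (N+1) (t:Int)) s1 hbounds
        unfold innerA
        refine ⟨by rw [hwlen, hlen1], ?_⟩
        intro m hm
        have hmlt : (m:Int) < (s1.length:Int) := by rw [hlen1]; push_cast; omega
        rw [hwget (m:Int) (by positivity) hmlt]
        have hmem : (m:Int) ∈ PySem.List.pyRange ((t:Int)*(t:Int)) (N+1) (t:Int) ↔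
            (t*t ≤ m ∧ t ∣ m) := by
          rw [PySem.List.mem_pyRange_iff_of_pos (by omega)]
          constructor
          · rintro ⟨ha, hb, hc⟩
            have : (t:Int) ∣ (m:Int) := by
              have := dvd_add hc (Dvd.intro (t:Int) rfl)
              simpa using this
            exact ⟨by exact_mod_cast ha, by exact_mod_cast this⟩
          · rintro ⟨ha, hb⟩
            refine ⟨by exact_mod_cast ha, by omega, ?_⟩
            exact dvd_sub (by exact_mod_cast hb) (Dvd.intro (t:Int) rfl)
        by_cases he : m = t
        · subst he
          rw [if_neg (by
            rintro ⟨hin, _⟩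
            have := (hmem.mp hin).1
            nlinarith), hget1 m hle', if_pos rfl, if_pos ⟨h2, by
              simp only [condA]; rw [if_pos hpr]; simp⟩, hpr]
        · rw [hget1 m hm, if_neg he, hget m hm]
          obtain ⟨hfresh, hmono⟩ := hmain m hm he
          by_cases hc : 2 ≤ m ∧ condA m t
          · have hmf2 : 2 ≤ m.minFac := (Nat.minFac_prime (by omega : m ≠ 1)).two_le
            rw [if_pos hc, if_neg (by rintro ⟨_, hv⟩; omega), if_pos (hmono hc)]
          · rw [if_neg hc]
            by_cases hw : t*t ≤ m ∧ t ∣ m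
            · have hmne : m ≠ t := he
              have h2m : 2 ≤ m := by nlinarith [hw.1]
              have hcomp : m.minFac ≠ m := by
                intro hmm
                have hmprime : Nat.Prime m := Nat.prime_def_minFac.mpr ⟨h2m, hmm⟩
                rcases (hmprime.eq_one_or_self_of_dvd t hw.2) with h | h <;> omega
              have hlet : m.minFac ≤ t := Nat.minFac_le_of_dvd hprime.two_le hw.2
              have hnc : ¬ condA m t := fun h => hc ⟨h2m, h⟩
              simp only [condA] at hnc
              rw [if_neg hcomp] at hnc
              simp only [decide_eq_true_eq] at hnc
              have hmf : m.minFac = t := by omega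
              rw [if_pos ⟨hmem.mpr hw, rfl⟩, if_pos ⟨h2m, by
                simp only [condA]; rw [if_neg hcomp]; simp only [decide_eq_true_eq]; omega⟩, hmf]
            · rw [if_neg (by rintro ⟨hin, _⟩; exact hw (hmem.mp hin)), if_neg]
              intro hcnew
              obtain ⟨h1', h2', h3'⟩ := hfresh hc hcnew
              exact hw ⟨h1', h2'⟩
      · rw [if_neg hguard]
        refine ⟨hlen1, ?_⟩
        intro m hm
        rw [hget1 m hm]
        by_cases he : m = t
        · subst he
          rw [if_pos rfl, if_pos ⟨h2, by
            simp only [condA]; rw [if_pos hpr]; simp⟩, hpr]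
        · rw [if_neg he, hget m hm]
          obtain ⟨hfresh, hmono⟩ := hmain m hm he
          by_cases hc : 2 ≤ m ∧ condA m t
          · rw [if_pos hc, if_pos (hmono hc)]
          · rw [if_neg hc, if_neg]
            intro hcnew
            obtain ⟨h1', h2', h3'⟩ := hfresh hc hcnew
            have : (t:Int)*(t:Int) ≤ N := by omega
            exact hguard this
    · -- t is composite: slot filled, nothing happens
      have hmfle : t.minFac < t := by
        have := Nat.minFac_le (show 0 < t by omega)
        omega
      have hnz : pvGet s (t:Int) ≠ 0 := by
        rw [htm, if_pos ⟨h2, by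
          simp only [condA]; rw [if_neg hpr]; simp only [decide_eq_true_eq]; omega⟩]
        have := (Nat.minFac_prime (by omega : t ≠ 1)).two_le
        omega
      rw [hstep]
      simp only [if_neg hnz]
      refine ⟨hlen, ?_⟩
      intro m hm
      rw [hget m hm]
      by_cases hc : 2 ≤ m ∧ condA m t
      · rw [if_pos hc, if_pos ⟨hc.1, by
          have := hc.2
          simp only [condA] at this ⊢
          split <;> split at this <;> simp_all only [decide_eq_true_eq] <;> omega⟩]
      · rw [if_neg hc, if_neg]
        rintro ⟨hm2, hcb⟩
        have hnc : ¬ condA m t := fun h => hc ⟨hm2, h⟩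
        simp only [condA] at hcb hnc
        by_cases hpm : m.minFac = m
        · rw [if_pos hpm] at hcb hnc
          simp only [decide_eq_true_eq] at hcb hnc
          have : m = t := by omega
          exact hpr (by rw [← this]; exact hpm)
        · rw [if_neg hpm] at hcb hnc
          simp only [decide_eq_true_eq] at hcb hnc
          have hmf : m.minFac = t := by omega
          have : Nat.Prime t := hmf ▸ Nat.minFac_prime (by omega : m ≠ 1)
          exact hpr (Nat.prime_def_minFac.mp this).2

theorem spfA_spec (N : Int) (hN : 1 ≤ N) (m : Nat) (h2 : 2 ≤ m) (hm : m ≤ N.toNat) :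
    pvGet (spfA N) (m:Int) = (m.minFac : Int) := by
  have h := (spfA_inv N hN (N.toNat+1) (by omega) le_rfl).2 m hm
  have e : ((N.toNat+1:Nat):Int) = N+1 := by omega
  rw [show spfA N = spfAUpTo N (N+1) from rfl, ← e, h, if_pos]
  refine ⟨h2, ?_⟩
  have := Nat.minFac_le (show 0 < m by omega)
  simp only [condA]
  split <;> simp only [decide_eq_true_eq] <;> omega

theorem stripA_spec (p : Int) (hp : 2 ≤ p) : ∀ (fuel : Nat) (y k : Int), 1 ≤ y → y ≤ (fuel:Int) →
    ∃ (j : Nat) (z : Int), stripA p fuel y k = (z, k + j) ∧ 1 ≤ z ∧ y = p^j * z := by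
  intro fuel
  induction fuel with
  | zero => intro y k hy hf; exfalso; omega
  | succ fuel ih =>
    intro y k hy hf
    by_cases hdvd : p ∣ y
    · have hmod : PySem.Int.mod y p = 0 := (PySem.Int.mod_eq_zero_iff_dvd y p).mpr hdvd
      obtain ⟨c, hc⟩ := hdvd
      have hc1 : 1 ≤ c := by
        by_contra h
        push Not at h
        have := mul_le_mul_of_nonneg_left (show c ≤ 0 by omega) (show (0:Int) ≤ p by omega)
        omega
      have hfd : PySem.Int.floordiv y p = c := by
        rw [PySem.Int.floordiv_eq_ediv_of_pos (by omega), hc, Int.mul_ediv_cancel_left _ (by omega)]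
      have h2c : 2 * c ≤ p * c := mul_le_mul_of_nonneg_right hp (by omega)
      have hcle : c ≤ (fuel : Int) := by omega
      obtain ⟨j, z, h1, h2, h3⟩ := ih c (k+1) hc1 hcle
      refine ⟨j+1, z, ?_, h2, ?_⟩
      · simp only [stripA, hmod, if_pos, hfd, h1]
        congr 1
        push_cast; ring
      · rw [hc, h3, pow_succ]; ring
    · have hmod : PySem.Int.mod y p ≠ 0 := fun h => hdvd ((PySem.Int.mod_eq_zero_iff_dvd y p).mp h)
      exact ⟨0, y, by simp [stripA, hmod], hy, by simp⟩

-- A's partial lambda loop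
def lamAUpTo (N t : Int) : List Int :=
  (PySem.List.pyRange 2 t 1).foldl (lamStepA (spfA N))
    (pvSet (List.replicate (N+1).toNat 0) 1 1)

theorem lamA_inv (N : Int) (hN : 1 ≤ N) : ∀ t : Nat, 2 ≤ t → t ≤ N.toNat+1 →
    ((lamAUpTo N (t:Int)).length = N.toNat+1 ∧
     ∀ m : Nat, m ≤ N.toNat →
       pvGet (lamAUpTo N (t:Int)) (m:Int) = if m < t then ref m else 0) := by
  intro t h2
  induction t, h2 using Nat.le_induction with
  | base =>
    intro _
    unfold lamAUpTo
    rw [show ((2:Nat):Int) = 2 by norm_num, PySem.List.pyRange_one_eq_nil (le_refl 2)]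
    simp only [List.foldl_nil]
    have hlen0 : (List.replicate (N+1).toNat (0:Int)).length = N.toNat+1 := by simp; omega
    refine ⟨by rw [length_pvSet, hlen0], ?_⟩
    intro m hm
    rw [pvGet_pvSet _ 1 _ _ (by omega) (by rw [hlen0]; push_cast; omega)
      (by positivity) (by rw [hlen0]; push_cast; omega)]
    match m with
    | 0 => simp [ref, pvGet_replicate]
    | 1 => simp [ref]
    | (k+2) =>
      rw [if_neg (by push_cast; omega), if_neg (by omega)]
      exact pvGet_replicate _ _
  | succ t h2 ih =>
    intro hle
    have hle' : t ≤ N.toNat := by omega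
    obtain ⟨hlen, hget⟩ := ih (by omega)
    have hstep : lamAUpTo N ((t+1:Nat):Int) = lamStepA (spfA N) (lamAUpTo N (t:Int)) (t:Int) := by
      unfold lamAUpTo
      rw [show ((t+1:Nat):Int) = (t:Int)+1 by push_cast; ring]
      rw [foldl_range2_succ _ _ _ (by exact_mod_cast h2)]
    set lam := lamAUpTo N (t:Int) with hlam
    have hp := spfA_spec N hN t h2 hle'
    have hprime : Nat.Prime t.minFac := Nat.minFac_prime (by omega : t ≠ 1)
    have hp2 : 2 ≤ t.minFac := hprime.two_le
    have hdvd : t.minFac ∣ t := Nat.minFac_dvd t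
    have hmle : t.minFac ≤ t := Nat.minFac_le (by omega)
    have hy0 : PySem.Int.floordiv (t:Int) (t.minFac : Int) = ((t / t.minFac : Nat) : Int) := by
      exact_mod_cast PySem.Int.floordiv_natCast t t.minFac
    have hy0ge : 1 ≤ ((t / t.minFac : Nat) : Int) := by
      have := Nat.div_pos hmle (by omega)
      push_cast; omega
    have hy0lt : (t / t.minFac : Nat) < t := Nat.div_lt_self (by omega) (by omega)
    have hfuel : ((t / t.minFac : Nat) : Int) ≤ ((t:Int).toNat : Int) := by push_cast; omega
    obtain ⟨j, z, hstrip, hz1, hzeq⟩ :=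
      stripA_spec (t.minFac : Int) (by exact_mod_cast hp2) (t:Int).toNat
        ((t / t.minFac : Nat) : Int) 1 hy0ge hfuel
    set zn := z.toNat with hzn
    have hzcast : z = (zn : Int) := by omega
    have hteq : t = t.minFac ^ (j+1) * zn := by
      have h1 : (t:Int) = (t.minFac : Int) * ((t / t.minFac : Nat) : Int) := by
        exact_mod_cast (Nat.mul_div_cancel' hdvd).symm
      have h2' : (t:Int) = (t.minFac : Int) ^ (j+1) * (zn:Int) := by
        rw [h1, hzeq, hzcast, pow_succ]; ring
      exact_mod_cast h2'
    have hpowge : 2 ≤ t.minFac ^ (j+1) := by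
      have h1 : 2^(j+1) ≤ t.minFac^(j+1) := Nat.pow_le_pow_left hp2 (j+1)
      have h2' : (2:Nat) ≤ 2^(j+1) := by
        calc (2:Nat) = 2^1 := rfl
        _ ≤ 2^(j+1) := Nat.pow_le_pow_right (by omega) (by omega)
      omega
    have hznlt : zn < t := by nlinarith [hteq, hpowge, show 1 ≤ zn by omega]
    have hdvdpow : t.minFac ^ (j+1) ∣ t := ⟨zn, hteq⟩
    have hdivz : t / t.minFac ^ (j+1) = zn :=
      Nat.div_eq_of_eq_mul_left (Nat.pow_pos (by omega)) (by nth_rewrite 1 [hteq]; ring)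
    have hrefval : ref zn * (-1:Int)^(j+1) = ref t := by
      rw [ref_pow t.minFac (j+1) t hprime hdvdpow (by omega), hdivz]; ring
    have hval : lamStepA (spfA N) lam (t:Int) = pvSet lam (t:Int) (ref t) := by
      show pvSet lam (t:Int)
        (pvGet lam (stripA (pvGet (spfA N) (t:Int)) (t:Int).toNat
          (PySem.Int.floordiv (t:Int) (pvGet (spfA N) (t:Int))) 1).1 *
          (-1)^((stripA (pvGet (spfA N) (t:Int)) (t:Int).toNat
          (PySem.Int.floordiv (t:Int) (pvGet (spfA N) (t:Int))) 1).2.toNat)) = _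
      rw [hp, hy0, hstrip]
      have hexp : ((1 + (j:Int))).toNat = j+1 := by omega
      have hlamz : pvGet lam z = ref zn := by
        rw [hzcast, hget zn (by omega), if_pos hznlt]
      simp only [hexp, hlamz]
      rw [hrefval]
    rw [hstep, hval]
    refine ⟨by rw [length_pvSet, hlen], ?_⟩
    intro m hm
    rw [pvGet_pvSet _ _ _ _ (by positivity) (by rw [hlen]; push_cast; omega)
      (by positivity) (by rw [hlen]; push_cast; omega)]
    by_cases he : m = t
    · subst he
      rw [if_pos rfl, if_pos (by omega)]
    · rw [if_neg (by exact_mod_cast he), hget m hm]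
      by_cases hlt : m < t
      · rw [if_pos hlt, if_pos (by omega)]
      · rw [if_neg hlt, if_neg (by omega)]

-- ===== B-side lemmas =====

-- generic get-after-set, used for the Bool composite array
theorem getD_setD {α : Type} (l : List α) (dflt v : α) (a b : Int) (ha : 0 ≤ a)
    (_ha2 : a < l.length) (hb : 0 ≤ b) (hb2 : b < l.length) :
    PySem.List.pyGetD (PySem.List.pySetD l a v) b dflt =
      if b = a then v else PySem.List.pyGetD l b dflt := by
  rw [PySem.List.pySetD_of_nonneg l v ha]
  rw [PySem.List.pyGetD_eq_getElem _ _ hb (by simpa using hb2)]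
  rw [PySem.List.pyGetD_eq_getElem _ _ hb hb2]
  rw [List.getElem_set]
  have : a.toNat = b.toNat ↔ b = a := by omega
  split_ifs with h1 h2 h2 <;> first | rfl | (exfalso; omega)

theorem length_setD {α : Type} (l : List α) (i : Int) (v : α) :
    (PySem.List.pySetD l i v).length = l.length := by
  simp

theorem pvGetB_replicate (n : Nat) (b : Int) : pvGetB (List.replicate n false) b = false := by
  unfold pvGetB
  by_cases h : PySem.Raise.InRange (List.replicate n false).length b
  · exact List.eq_of_mem_replicate (PySem.List.pyGetD_mem _ false h)
  · exact PySem.List.pyGetD_of_none _ _ _ ((PySem.List.pyGet?_eq_none_iff _ _).mpr (by simpa using h))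

theorem nodup_pyRange_pos (a b s : Int) (hs : 0 < s) : (PySem.List.pyRange a b s).Nodup := by
  rw [PySem.List.pyRange_of_pos a b hs]
  refine List.Nodup.map ?_ List.nodup_range
  intro x y h
  have h2 : s * (x:Int) = s * (y:Int) := add_left_cancel h
  have h3 := mul_left_cancel₀ (by omega : s ≠ 0) h2
  exact_mod_cast h3

-- the composite-marking loop: a slot becomes true exactly when its index is hit
theorem foldl_mark : ∀ (js : List Int) (c : List Bool),
    (∀ j ∈ js, 0 ≤ j ∧ j < (c.length : Int)) →
    ((js.foldl (fun s j => PySem.List.pySetD s j true) c).length = c.length ∧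
     ∀ b : Int, 0 ≤ b → b < (c.length : Int) →
       pvGetB (js.foldl (fun s j => PySem.List.pySetD s j true) c) b =
         if b ∈ js then true else pvGetB c b) := by
  intro js
  induction js with
  | nil => intro c _; simp
  | cons j js ih =>
    intro c hjs
    obtain ⟨hj0, hj1⟩ := hjs j (by simp)
    set c1 := PySem.List.pySetD c j true with hc1
    have hlen1 : c1.length = c.length := by rw [hc1, length_setD]
    have hget1 : ∀ b : Int, 0 ≤ b → b < (c.length : Int) →
        pvGetB c1 b = if b = j then true else pvGetB c b := by
      intro b hb0 hb1
      rw [hc1]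
      exact getD_setD c false true j b hj0 (by omega) hb0 (by omega)
    obtain ⟨hl, hg⟩ := ih c1 (by rw [hlen1]; intro x hx; exact hjs x (by simp [hx]))
    refine ⟨by rw [List.foldl_cons, ← hc1, hl, hlen1], ?_⟩
    intro b hb0 hb1
    rw [List.foldl_cons, ← hc1, hg b hb0 (by rw [hlen1]; exact hb1), hget1 b hb0 hb1]
    by_cases hbj : b = j
    · subst hbj; simp
    · by_cases hbm : b ∈ js <;> simp [hbj, hbm]

-- the flip pass: each visit negates, so the result is (-1)^(number of visits)
theorem foldl_flip : ∀ (js : List Int) (s : List Int),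
    (∀ j ∈ js, 0 ≤ j ∧ j < (s.length : Int)) →
    ((js.foldl (fun s j => pvSet s j (-(pvGet s j))) s).length = s.length ∧
     ∀ b : Int, 0 ≤ b → b < (s.length : Int) →
       pvGet (js.foldl (fun s j => pvSet s j (-(pvGet s j))) s) b =
         (-1)^(js.count b) * pvGet s b) := by
  intro js
  induction js with
  | nil => intro s _; simp
  | cons j js ih =>
    intro s hjs
    obtain ⟨hj0, hj1⟩ := hjs j (by simp)
    set s1 := pvSet s j (-(pvGet s j)) with hs1
    have hlen1 : s1.length = s.length := by rw [hs1, length_pvSet]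
    have hget1 : ∀ b : Int, 0 ≤ b → b < (s.length : Int) →
        pvGet s1 b = if b = j then -(pvGet s j) else pvGet s b := by
      intro b hb0 hb1
      rw [hs1, pvGet_pvSet s j b _ hj0 (by omega) hb0 (by omega)]
    obtain ⟨hl, hg⟩ := ih s1 (by rw [hlen1]; intro x hx; exact hjs x (by simp [hx]))
    refine ⟨by rw [List.foldl_cons, ← hs1, hl, hlen1], ?_⟩
    intro b hb0 hb1
    rw [List.foldl_cons, ← hs1, hg b hb0 (by rw [hlen1]; exact hb1), hget1 b hb0 hb1]
    by_cases hbj : b = j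
    · subst hbj
      rw [if_pos rfl, List.count_cons_self, pow_succ]
      ring
    · rw [if_neg hbj, show List.count b (j :: js) = List.count b js from by
        simp [List.count_cons]
        exact fun hh => hbj hh.symm]

theorem flipMult_spec (N q : Int) (hq : 2 ≤ q) (hN : 1 ≤ N) (lam : List Int)
    (hlen : lam.length = N.toNat+1) :
    (flipMult N q lam).length = N.toNat+1 ∧
    pvGet (flipMult N q lam) 0 = pvGet lam 0 ∧
    ∀ m : Nat, 1 ≤ m → m ≤ N.toNat →
      pvGet (flipMult N q lam) (m:Int) =
        if q ∣ (m:Int) then -(pvGet lam (m:Int)) else pvGet lam (m:Int) := by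
  have hlen' : (lam.length : Int) = N + 1 := by rw [hlen]; push_cast; omega
  have hbounds : ∀ j ∈ PySem.List.pyRange q (N+1) q, 0 ≤ j ∧ j < (lam.length : Int) := by
    intro j hj
    rw [PySem.List.mem_pyRange_iff_of_pos (by omega)] at hj
    omega
  obtain ⟨hl, hg⟩ := foldl_flip (PySem.List.pyRange q (N+1) q) lam hbounds
  have hmem : ∀ b : Int, b ∈ PySem.List.pyRange q (N+1) q ↔ (q ≤ b ∧ b ≤ N ∧ q ∣ b) := by
    intro b
    rw [PySem.List.mem_pyRange_iff_of_pos (by omega)]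
    constructor
    · rintro ⟨h1, h2, h3⟩
      have h4 : q ∣ b := by
        have := dvd_add h3 (dvd_refl q)
        simpa using this
      exact ⟨h1, by omega, h4⟩
    · rintro ⟨h1, h2, h3⟩
      exact ⟨h1, by omega, dvd_sub h3 (dvd_refl q)⟩
  have hcount : ∀ b : Int, (PySem.List.pyRange q (N+1) q).count b =
      if b ∈ PySem.List.pyRange q (N+1) q then 1 else 0 := by
    intro b
    by_cases hb : b ∈ PySem.List.pyRange q (N+1) q
    · rw [if_pos hb, List.count_eq_one_of_mem (nodup_pyRange_pos _ _ _ (by omega)) hb]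
    · rw [if_neg hb, List.count_eq_zero.mpr hb]
  refine ⟨by unfold flipMult; rw [hl, hlen], ?_, ?_⟩
  · show pvGet ((PySem.List.pyRange q (N+1) q).foldl (fun s j => pvSet s j (-(pvGet s j))) lam) 0 =
      pvGet lam 0
    rw [hg 0 le_rfl (by omega), hcount, if_neg (by
      intro hb
      have := (hmem 0).mp hb
      omega)]
    ring
  · intro m hm1 hm2
    show pvGet ((PySem.List.pyRange q (N+1) q).foldl (fun s j => pvSet s j (-(pvGet s j))) lam)
      (m:Int) = _
    rw [hg (m:Int) (by positivity) (by omega), hcount]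
    by_cases hd : q ∣ (m:Int)
    · rw [if_pos ((hmem (m:Int)).mpr ⟨Int.le_of_dvd (by omega) hd, by omega, hd⟩), if_pos hd]
      ring
    · rw [if_neg (fun hb => hd ((hmem (m:Int)).mp hb).2.2), if_neg hd]
      ring

theorem powersB_spec (N p : Int) (hN : 1 ≤ N) (hp2 : 2 ≤ p) (hpr : Nat.Prime p.toNat) :
    ∀ (fuel : Nat) (s : Nat) (lam : List Int), 1 ≤ s → lam.length = N.toNat+1 →
    N < p^(s + fuel) →
    (powersB N p fuel (p^s) lam).length = N.toNat+1 ∧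
    pvGet (powersB N p fuel (p^s) lam) 0 = pvGet lam 0 ∧
    ∀ m : Nat, 1 ≤ m → m ≤ N.toNat →
      pvGet (powersB N p fuel (p^s) lam) (m:Int) =
        pvGet lam (m:Int) * (-1)^(m.factorization p.toNat + 1 - s) := by
  have hcast : ∀ k : Nat, ((p.toNat^k : Nat) : Int) = p^k := by
    intro k
    push_cast
    rw [Int.toNat_of_nonneg (by omega)]
  have hnodvd : ∀ (s : Nat) (m : Nat), 1 ≤ m → m ≤ N.toNat → N < p^s →
      m.factorization p.toNat + 1 - s = 0 := by
    intro s m hm1 hm2 hNs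
    have hnd : ¬ (s ≤ m.factorization p.toNat) := by
      intro hle
      have hdvd : p.toNat^s ∣ m := (hpr.pow_dvd_iff_le_factorization (by omega)).mpr hle
      have h1 : p.toNat^s ≤ m := Nat.le_of_dvd (by omega) hdvd
      have h2 : ((p.toNat^s : Nat) : Int) ≤ (m:Int) := by exact_mod_cast h1
      rw [hcast s] at h2
      omega
    omega
  intro fuel
  induction fuel with
  | zero =>
    intro s lam hs hlen hfuel
    refine ⟨hlen, rfl, ?_⟩
    intro m hm1 hm2
    rw [show powersB N p 0 (p^s) lam = lam from rfl,
      hnodvd s m hm1 hm2 (by simpa using hfuel)]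
    simp
  | succ fuel ih =>
    intro s lam hs hlen hfuel
    by_cases hqN : p^s ≤ N
    · have hstep : powersB N p (fuel+1) (p^s) lam =
          powersB N p fuel (p^(s+1)) (flipMult N (p^s) lam) := by
        show (if p^s ≤ N then powersB N p fuel (p^s*p) (flipMult N (p^s) lam) else lam) = _
        rw [if_pos hqN, ← pow_succ]
      have hq2 : 2 ≤ p^s := by
        calc (2:Int) = 2^1 := by norm_num
        _ ≤ 2^s := by
            apply pow_le_pow_right₀ (by norm_num) (by omega)
        _ ≤ p^s := by
            apply pow_le_pow_left₀ (by norm_num) hp2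
      obtain ⟨fl, f0, fm⟩ := flipMult_spec N (p^s) hq2 hN lam hlen
      obtain ⟨il, i0, im⟩ := ih (s+1) (flipMult N (p^s) lam) (by omega) fl
        (by rw [show s+1+fuel = s+(fuel+1) by ring]; exact hfuel)
      rw [hstep]
      refine ⟨il, by rw [i0, f0], ?_⟩
      intro m hm1 hm2
      rw [im m hm1 hm2, fm m hm1 hm2]
      by_cases hdvd : p^s ∣ (m:Int)
      · have hsv : s ≤ m.factorization p.toNat := by
          apply (hpr.pow_dvd_iff_le_factorization (by omega)).mp
          have h1 : ((p.toNat^s : Nat) : Int) ∣ ((m:Nat) : Int) := by rw [hcast s]; exact hdvd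
          exact_mod_cast h1
        rw [if_pos hdvd, show m.factorization p.toNat + 1 - (s+1) =
          m.factorization p.toNat - s by omega, show m.factorization p.toNat + 1 - s =
          (m.factorization p.toNat - s) + 1 by omega, pow_succ]
        ring
      · have hsv : ¬ s ≤ m.factorization p.toNat := by
          intro hle
          apply hdvd
          have h1 : p.toNat^s ∣ m := (hpr.pow_dvd_iff_le_factorization (by omega)).mpr hle
          have h2 : ((p.toNat^s : Nat) : Int) ∣ ((m:Nat) : Int) := by exact_mod_cast h1
          rwa [hcast s] at h2
        rw [if_neg hdvd, show m.factorization p.toNat + 1 - (s+1) = 0 by omega,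
          show m.factorization p.toNat + 1 - s = 0 by omega]
    · have hstep : powersB N p (fuel+1) (p^s) lam = lam := by
        show (if p^s ≤ N then powersB N p fuel (p^s*p) (flipMult N (p^s) lam) else lam) = _
        rw [if_neg hqN]
      rw [hstep]
      refine ⟨hlen, rfl, ?_⟩
      intro m hm1 hm2
      rw [hnodvd s m hm1 hm2 (by omega)]
      simp

-- the exponent sum over the primes already processed
def eCnt (t m : Nat) : Nat := ∑ p ∈ m.primeFactors.filter (fun p => p < t), m.factorization p

theorem eCnt_two (m : Nat) : eCnt 2 m = 0 := by
  unfold eCnt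
  rw [Finset.filter_false_of_mem, Finset.sum_empty]
  intro p hp
  have := (Nat.mem_primeFactors.mp hp).1.two_le
  omega

theorem eCnt_succ (t m : Nat) (hm : m ≠ 0) :
    eCnt (t+1) m = eCnt t m + (if Nat.Prime t ∧ t ∣ m then m.factorization t else 0) := by
  unfold eCnt
  have hsplit : m.primeFactors.filter (fun p => p < t+1) =
      m.primeFactors.filter (fun p => p < t) ∪ m.primeFactors.filter (fun p => p = t) := by
    rw [← Finset.filter_or]
    apply Finset.filter_congr
    intro p _
    constructor
    · intro h; omega
    · intro h; omega
  rw [hsplit, Finset.sum_union (by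
    rw [Finset.disjoint_left]
    intro a ha hb
    simp only [Finset.mem_filter] at ha hb
    omega), Finset.filter_eq']
  by_cases ht : t ∈ m.primeFactors
  · rw [if_pos ht, Finset.sum_singleton, if_pos
      ⟨(Nat.mem_primeFactors.mp ht).1, (Nat.mem_primeFactors.mp ht).2.1⟩]
  · rw [if_neg ht, Finset.sum_empty, if_neg]
    rintro ⟨h1, h2⟩
    exact ht (Nat.mem_primeFactors.mpr ⟨h1, h2, hm⟩)

theorem eCnt_top (n m : Nat) (hm : 1 ≤ m) (hmN : m ≤ n) :
    eCnt (n+1) m = m.primeFactorsList.length := by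
  unfold eCnt
  rw [Finset.filter_true_of_mem (by
    intro p hp
    have hdvd := (Nat.mem_primeFactors.mp hp).2.1
    have := Nat.le_of_dvd (by omega) hdvd
    omega)]
  rw [show m.primeFactors = m.primeFactorsList.toFinset from (Nat.toFinset_factors m).symm]
  rw [Finset.sum_congr rfl (fun p _ => (Nat.primeFactorsList_count_eq).symm)]
  exact List.sum_toFinset_count_eq_length m.primeFactorsList

-- partial outer loop of B, for induction over t
def altUpTo (N t : Int) : List Int × List Bool :=
  (PySem.List.pyRange 2 t 1).foldl (stageB N)
    (pvSet (List.replicate (N+1).toNat 1) 0 0, List.replicate (N+1).toNat false)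

theorem alt_inv (N : Int) (hN : 1 ≤ N) : ∀ t : Nat, 2 ≤ t → t ≤ N.toNat+1 →
    ((altUpTo N (t:Int)).1.length = N.toNat+1 ∧
     (altUpTo N (t:Int)).2.length = N.toNat+1 ∧
     (∀ m : Nat, m ≤ N.toNat → pvGetB (altUpTo N (t:Int)).2 (m:Int) =
        decide (2 ≤ m ∧ m.minFac ≠ m ∧ m.minFac < t)) ∧
     (∀ m : Nat, m ≤ N.toNat → pvGet (altUpTo N (t:Int)).1 (m:Int) =
        if m = 0 then 0 else (-1)^(eCnt t m))) := by
  intro t h2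
  induction t, h2 using Nat.le_induction with
  | base =>
    intro _
    unfold altUpTo
    rw [show ((2:Nat):Int) = 2 by norm_num, PySem.List.pyRange_one_eq_nil (le_refl 2)]
    simp only [List.foldl_nil]
    have hlen0 : (List.replicate (N+1).toNat (1:Int)).length = N.toNat+1 := by simp; omega
    have hlenb : (List.replicate (N+1).toNat false).length = N.toNat+1 := by simp; omega
    refine ⟨by rw [length_pvSet, hlen0], hlenb, ?_, ?_⟩
    · intro m hm
      rw [pvGetB_replicate]
      symm
      simp only [decide_eq_false_iff_not]
      rintro ⟨h2m, hne, hlt⟩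
      have := (Nat.minFac_prime (by omega : m ≠ 1)).two_le
      omega
    · intro m hm
      rw [pvGet_pvSet _ 0 _ _ le_rfl (by rw [hlen0]; push_cast; omega)
        (by positivity) (by rw [hlen0]; push_cast; omega)]
      by_cases hm0 : m = 0
      · subst hm0; simp
      · rw [if_neg (by exact_mod_cast hm0), if_neg hm0, eCnt_two, pow_zero]
        unfold pvGet
        rw [PySem.List.pyGetD_eq_getElem _ _ (by positivity) (by
          rw [hlen0]; push_cast; omega)]
        simp
  | succ t h2 ih =>
    intro hle
    have hle' : t ≤ N.toNat := by omega
    obtain ⟨hlam, hcomp, hgetc, hgetl⟩ := ih (by omega)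
    have hstep : altUpTo N ((t+1:Nat):Int) = stageB N (altUpTo N (t:Int)) (t:Int) := by
      unfold altUpTo
      rw [show ((t+1:Nat):Int) = (t:Int)+1 by push_cast; ring]
      rw [foldl_range2_succ _ _ _ (by exact_mod_cast h2)]
    have htc : pvGetB (altUpTo N (t:Int)).2 (t:Int) =
        decide (2 ≤ t ∧ t.minFac ≠ t ∧ t.minFac < t) := hgetc t hle'
    have hmfle : t.minFac ≤ t := Nat.minFac_le (by omega)
    by_cases hpr : t.minFac = t
    · -- t is prime: the stage runs
      have hprime : Nat.Prime t := Nat.prime_def_minFac.mpr ⟨h2, hpr⟩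
      have hf : pvGetB (altUpTo N (t:Int)).2 (t:Int) = false := by
        rw [htc]
        simp only [decide_eq_false_iff_not]
        rintro ⟨_, hne, _⟩
        exact hne hpr
      have hst : stageB N (altUpTo N (t:Int)) (t:Int) =
          (powersB N (t:Int) (N.toNat+1) (t:Int) (altUpTo N (t:Int)).1,
           compMark N (t:Int) (altUpTo N (t:Int)).2) := by
        unfold stageB
        rw [if_pos hf]
      rw [hstep, hst]
      -- powers loop: fuel condition N < t^(1+(N.toNat+1))
      have hfuel : N < (t:Int)^(1+(N.toNat+1)) := by
        have h1 : N.toNat < 2^(N.toNat+2) := by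
          have := @Nat.lt_two_pow_self N.toNat
          have h2' : (2:Nat)^N.toNat ≤ 2^(N.toNat+2) := Nat.pow_le_pow_right (by omega) (by omega)
          omega
        have h2' : ((2:Nat)^(N.toNat+2) : Int) ≤ (t:Int)^(N.toNat+2) := by
          have : ((2:Nat):Int) ≤ (t:Int) := by exact_mod_cast h2
          calc ((2:Nat)^(N.toNat+2) : Int) = (2:Int)^(N.toNat+2) := by push_cast; ring
          _ ≤ (t:Int)^(N.toNat+2) := by
              apply pow_le_pow_left₀ (by norm_num) (by exact_mod_cast h2)
        have h3 : (N.toNat : Int) < ((2:Nat)^(N.toNat+2) : Int) := by exact_mod_cast h1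
        have h4 : 1+(N.toNat+1) = N.toNat+2 := by omega
        rw [h4]
        omega
      have hone : (t:Int)^1 = (t:Int) := by ring
      obtain ⟨pl, p0, pm⟩ := by
        have := powersB_spec N (t:Int) hN (by exact_mod_cast h2)
          (by rw [Int.toNat_natCast]; exact hprime) (N.toNat+1) 1
          (altUpTo N (t:Int)).1 le_rfl hlam hfuel
        rwa [hone, Int.toNat_natCast] at this
      -- composite marking
      have hbounds : ∀ j ∈ PySem.List.pyRange ((t:Int)*(t:Int)) (N+1) (t:Int),
          0 ≤ j ∧ j < ((altUpTo N (t:Int)).2.length : Int) := by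
        intro j hj
        rw [PySem.List.mem_pyRange_iff_of_pos (by omega)] at hj
        have ht0 : (0:Int) ≤ (t:Int)*(t:Int) := by positivity
        have : ((altUpTo N (t:Int)).2.length : Int) = (N.toNat : Int) + 1 := by
          rw [hcomp]; push_cast; ring
        omega
      obtain ⟨ml, mg⟩ := foldl_mark (PySem.List.pyRange ((t:Int)*(t:Int)) (N+1) (t:Int))
        (altUpTo N (t:Int)).2 hbounds
      have hmem : ∀ m : Nat, m ≤ N.toNat →
          ((m:Int) ∈ PySem.List.pyRange ((t:Int)*(t:Int)) (N+1) (t:Int) ↔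
           (t*t ≤ m ∧ t ∣ m)) := by
        intro m hm
        rw [PySem.List.mem_pyRange_iff_of_pos (by omega)]
        constructor
        · rintro ⟨ha, hb, hc⟩
          have : (t:Int) ∣ (m:Int) := by
            have := dvd_add hc (Dvd.intro (t:Int) rfl)
            simpa using this
          exact ⟨by exact_mod_cast ha, by exact_mod_cast this⟩
        · rintro ⟨ha, hb⟩
          refine ⟨by exact_mod_cast ha, by omega, ?_⟩
          exact dvd_sub (by exact_mod_cast hb) (Dvd.intro (t:Int) rfl)
      refine ⟨pl, by
        show (compMark N (t:Int) (altUpTo N (t:Int)).2).length = N.toNat+1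
        show ((PySem.List.pyRange ((t:Int)*(t:Int)) (N+1) (t:Int)).foldl
          (fun s j => PySem.List.pySetD s j true) (altUpTo N (t:Int)).2).length = N.toNat+1
        rw [ml, hcomp], ?_, ?_⟩
      · -- comp invariant advances
        intro m hm
        show pvGetB (compMark N (t:Int) (altUpTo N (t:Int)).2) (m:Int) = _
        show pvGetB ((PySem.List.pyRange ((t:Int)*(t:Int)) (N+1) (t:Int)).foldl
          (fun s j => PySem.List.pySetD s j true) (altUpTo N (t:Int)).2) (m:Int) = _
        rw [mg (m:Int) (by positivity) (by rw [hcomp]; push_cast; omega), hgetc m hm]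
        by_cases hin : (t*t ≤ m ∧ t ∣ m)
        · rw [if_pos ((hmem m hm).mpr hin)]
          symm
          simp only [decide_eq_true_eq]
          have h2m : 2 ≤ m := by nlinarith [hin.1]
          have hmfle' : m.minFac ≤ t := Nat.minFac_le_of_dvd hprime.two_le hin.2
          refine ⟨h2m, ?_, by omega⟩
          intro hmm
          have hmp : Nat.Prime m := Nat.prime_def_minFac.mpr ⟨h2m, hmm⟩
          rcases hmp.eq_one_or_self_of_dvd t hin.2 with h | h
          · omega
          · subst h
            nlinarith [hin.1]
        · rw [if_neg (fun hb => hin ((hmem m hm).mp hb))]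
          by_cases hc : (2 ≤ m ∧ m.minFac ≠ m ∧ m.minFac < t)
          · rw [decide_eq_true hc, decide_eq_true ⟨hc.1, hc.2.1, by omega⟩]
          · rw [decide_eq_false hc, eq_comm, decide_eq_false_iff_not]
            rintro ⟨h2m, hne, hlt⟩
            have hmf : m.minFac = t := by
              by_cases h : m.minFac < t
              · exact absurd ⟨h2m, hne, h⟩ hc
              · omega
            exact hin ⟨sq_minFac_le m t h2m hmf (by omega), hmf ▸ Nat.minFac_dvd m⟩
      · -- lambda invariant advances
        intro m hm
        show pvGet (powersB N (t:Int) (N.toNat+1) (t:Int) (altUpTo N (t:Int)).1) (m:Int) = _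
        by_cases hm0 : m = 0
        · subst hm0
          have h0 := hgetl 0 (by omega)
          simp only [Nat.cast_zero] at h0
          simp only [Nat.cast_zero]
          rw [p0, h0]
          simp
        · rw [pm m (by omega) hm, hgetl m hm, if_neg hm0, if_neg hm0]
          have hecnt : eCnt (t+1) m = eCnt t m + m.factorization t := by
            rw [eCnt_succ t m hm0]
            by_cases hdvd : t ∣ m
            · rw [if_pos ⟨hprime, hdvd⟩]
            · rw [if_neg (fun h => hdvd h.2), Nat.factorization_eq_zero_of_not_dvd hdvd]
          rw [hecnt, show m.factorization t + 1 - 1 = m.factorization t by omega, pow_add]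
    · -- t is composite: its comp slot is true, the stage is skipped
      have hnf : pvGetB (altUpTo N (t:Int)).2 (t:Int) ≠ false := by
        rw [htc]
        simp only [ne_eq, decide_eq_false_iff_not, not_not]
        exact ⟨h2, hpr, by omega⟩
      have hT : Nat.Prime t → False := fun hp => hpr (Nat.prime_def_minFac.mp hp).2
      have hst : stageB N (altUpTo N (t:Int)) (t:Int) = altUpTo N (t:Int) := by
        unfold stageB
        rw [if_neg hnf]
      rw [hstep, hst]
      refine ⟨hlam, hcomp, ?_, ?_⟩
      · intro m hm
        rw [hgetc m hm]
        by_cases hc : (2 ≤ m ∧ m.minFac ≠ m ∧ m.minFac < t)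
        · rw [decide_eq_true hc, decide_eq_true ⟨hc.1, hc.2.1, by omega⟩]
        · rw [decide_eq_false hc, eq_comm, decide_eq_false_iff_not]
          rintro ⟨h2m, hne, hlt⟩
          have hmf : m.minFac = t := by
            by_cases h : m.minFac < t
            · exact absurd ⟨h2m, hne, h⟩ hc
            · omega
          exact hT (hmf ▸ Nat.minFac_prime (by omega : m ≠ 1))
      · intro m hm
        rw [hgetl m hm]
        by_cases hm0 : m = 0
        · simp [hm0]
        · rw [if_neg hm0, if_neg hm0, eCnt_succ t m hm0,
            if_neg (fun h => hT h.1), Nat.add_zero]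

-- ===== VERDICT (by name: the statement is the Claim_ definition above) =====
theorem sieve_lambda_spec : Claim_equal_sieve_lambda := by
  intro N _ hpre
  have hN : 1 ≤ N := hpre
  show sieve_lambda N = sieve_lambda_alt N
  have e : ((N.toNat+1:Nat):Int) = N+1 := by omega
  obtain ⟨hlenA, hgetA⟩ := lamA_inv N hN (N.toNat+1) (by omega) le_rfl
  rw [e] at hlenA hgetA
  obtain ⟨hlenB, _, _, hgetB⟩ := alt_inv N hN (N.toNat+1) (by omega) le_rfl
  rw [e] at hlenB hgetB
  have hA : sieve_lambda N = lamAUpTo N (N+1) := rfl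
  have hB : sieve_lambda_alt N = (altUpTo N (N+1)).1 := rfl
  rw [hA, hB]
  apply List.ext_getElem (by rw [hlenA, hlenB])
  intro k hk1 hk2
  have hkN : k ≤ N.toNat := by rw [hlenA] at hk1; omega
  have gA := hgetA k hkN
  rw [if_pos (by omega)] at gA
  have eA : (lamAUpTo N (N+1))[k] = ref k := by
    rw [show pvGet (lamAUpTo N (N+1)) (k:Int) = (lamAUpTo N (N+1)).getD k 0 from by
      simp [pvGet], List.getD_eq_getElem _ _ hk1] at gA
    exact gA
  have gB := hgetB k hkN
  have eB : (altUpTo N (N+1)).1[k] = if k = 0 then 0 else (-1:Int)^(eCnt (N.toNat+1) k) := by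
    rw [show pvGet (altUpTo N (N+1)).1 (k:Int) = (altUpTo N (N+1)).1.getD k 0 from by
      simp [pvGet], List.getD_eq_getElem _ _ hk2] at gB
    exact gB
  rw [eA, eB]
  by_cases hk0 : k = 0
  · subst hk0; simp [ref]
  · rw [if_neg hk0, eCnt_top N.toNat k (by omega) hkN]
    simp [ref, hk0]
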